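-- pv_equiv track=rewrite | github.com/OElesin/knowledge-keeper | lambdas/ingestion/parser/logic.py | reconstruct_threads
-- ===== SOURCE A (Python) =====
-- from typing import Any, Literal
--
-- def reconstruct_threads(messages: list[dict[str, Any]]) -> list[list[dict[str, Any]]]:
--     """Reconstruct email threads from a flat list of parsed messages.
--
--     Builds a message_id → message lookup and an in_reply_to → parent graph,
--     then walks depth-first from root messages (those with no parent) to
--     produce ordered thread chains.
--
--     Returns a list of threads, each thread being a chronologically ordered
--     list of message dicts.
--     """
--     if not messages:
--         return []
--
--     by_id: dict[str, dict[str, Any]] = {}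
--     children: dict[str, list[str]] = {}
--
--     for msg in messages:
--         mid = msg["message_id"]
--         by_id[mid] = msg
--         parent = msg.get("in_reply_to", "")
--         if parent:
--             children.setdefault(parent, []).append(mid)
--
--     # Roots are messages whose in_reply_to is empty or points to an
--     # unknown message_id (not in this batch).
--     roots: list[str] = []
--     for msg in messages:
--         parent = msg.get("in_reply_to", "")
--         if not parent or parent not in by_id:
--             roots.append(msg["message_id"])
--
--     visited: set[str] = set()
--     threads: list[list[dict[str, Any]]] = []
--
--     for root_id in roots:
--         thread: list[dict[str, Any]] = []
--         _walk_thread(root_id, by_id, children, thread, visited)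
--         if thread:
--             # Sort chronologically within each thread
--             thread.sort(key=lambda m: m.get("date", ""))
--             threads.append(thread)
--
--     # Collect any orphaned messages not reached by the walk
--     for msg in messages:
--         if msg["message_id"] not in visited:
--             threads.append([msg])
--             visited.add(msg["message_id"])
--
--     return threads
--
-- def _walk_thread(
--     message_id: str,
--     by_id: dict[str, dict[str, Any]],
--     children: dict[str, list[str]],
--     thread: list[dict[str, Any]],
--     visited: set[str],
-- ) -> None:
--     """Depth-first walk from a message through its children."""
--     if message_id in visited:
--         return
--     visited.add(message_id)
--
--     msg = by_id.get(message_id)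
--     if msg is not None:
--         thread.append(msg)
--
--     for child_id in children.get(message_id, []):
--         _walk_thread(child_id, by_id, children, thread, visited)
-- ===== SOURCE B (Python) =====
-- def reconstruct_threads(messages):
--     """Single fused pass: root test and an id-collecting iterative walk are
--     inlined per message (no separate roots list, no recursion); the walk
--     gathers message_ids only and the messages are looked up when sorting."""
--     by_id = {m["message_id"]: m for m in messages}
--     children = {}
--     for m in messages:
--         parent = m.get("in_reply_to", "")
--         if parent:
--             children.setdefault(parent, []).append(m["message_id"])
--
--     visited = set()
--     threads = []
--     for m in messages:
--         parent = m.get("in_reply_to", "")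
--         if parent and parent in by_id:
--             continue  # not a root
--         order = []
--         stack = [m["message_id"]]
--         while stack:
--             mid = stack.pop()
--             if mid in visited:
--                 continue
--             visited.add(mid)
--             order.append(mid)
--             stack.extend(reversed(children.get(mid, ())))
--         if order:
--             threads.append(sorted((by_id[k] for k in order),
--                                   key=lambda d: d.get("date", "")))
--
--     for m in messages:
--         mid = m["message_id"]
--         if mid not in visited:
--             visited.add(mid)
--             threads.append([m])
--
--     return threads
-- ===== Notes on version B (the rewrite author's own statement) =====
-- stated objective: alternative
-- what changed: A's separate roots pass, recursive _walk_thread and per-root loop are fused into one loop over the messages whose body inlines an iterative explicit-stack walk that collects message_ids only (messages are looked up when the thread is sorted); by_id becomes a dict comprehension and the empty-input guard disappears.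
import Mathlib
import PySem

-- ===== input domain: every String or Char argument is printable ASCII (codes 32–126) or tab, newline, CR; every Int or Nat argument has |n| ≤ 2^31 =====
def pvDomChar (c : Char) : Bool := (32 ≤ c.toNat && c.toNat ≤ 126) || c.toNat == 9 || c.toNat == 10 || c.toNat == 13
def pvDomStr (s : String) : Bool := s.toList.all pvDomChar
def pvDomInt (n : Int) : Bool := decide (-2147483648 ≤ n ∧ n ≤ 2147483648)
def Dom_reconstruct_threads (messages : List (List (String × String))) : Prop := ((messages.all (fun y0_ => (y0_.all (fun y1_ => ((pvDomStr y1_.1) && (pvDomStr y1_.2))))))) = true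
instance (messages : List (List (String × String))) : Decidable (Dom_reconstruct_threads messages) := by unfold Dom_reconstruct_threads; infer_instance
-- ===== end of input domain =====

-- B fuses A's three passes (roots list, recursive walk, per-root step) into ONE loop over the
-- messages whose body inlines an iterative id-collecting walk: no roots list is ever built, no
-- recursion, the walk gathers message_ids only and messages are looked up when the thread is
-- sorted (objective: alternative).

-- Shared accessors: each message is a Python dict, modelled as an assoc list (first-match lookup).
def pvMsgGet? (m : List (String × String)) (k : String) : Option String :=
  (PySem.Dict.mk m).get? k

-- msg["message_id"]; total form via getD "" — Pre_ guarantees the key is present.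
def pvMid (m : List (String × String)) : String := (pvMsgGet? m "message_id").getD ""

-- msg.get("in_reply_to", "")
def pvParent (m : List (String × String)) : String := (pvMsgGet? m "in_reply_to").getD ""

-- key=lambda m: m.get("date", "")
def pvDate (m : List (String × String)) : String := (pvMsgGet? m "date").getD ""

-- ===== PORT A =====
-- The build loop: by_id[mid] = msg; children.setdefault(parent, []).append(mid)
def pvBuild (messages : List (List (String × String))) :
    PySem.Dict String (List (String × String)) × PySem.Dict String (List String) :=
  messages.foldl
    (fun st msg =>
      (st.1.insert (pvMid msg) msg,
       if pvParent msg ≠ "" then st.2.modify (pvParent msg) [] (fun l => l ++ [pvMid msg]) else st.2))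
    (PySem.Dict.empty, PySem.Dict.empty)

-- The trailing orphan-collection loop.
def pvOrphans (threads : List (List (List (String × String)))) (visited : PySem.Set String)
    (messages : List (List (String × String))) : List (List (List (String × String))) :=
  (messages.foldl
    (fun st msg =>
      if st.2.contains (pvMid msg) = false then (st.1 ++ [[msg]], st.2.add (pvMid msg)) else st)
    (threads, visited)).1

-- _walk_thread, with a fuel guard making the recursion total (fuel is never exhausted on real calls).
def pvWalkThread (by_id : PySem.Dict String (List (String × String)))
    (children : PySem.Dict String (List String)) (fuel : Nat) (mid : String)
    (st : List (List (String × String)) × PySem.Set String) :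
    List (List (String × String)) × PySem.Set String :=
  match fuel with
  | 0 => st
  | f + 1 =>
    if st.2.contains mid then st
    else
      let vis := st.2.add mid
      let th := match by_id.get? mid with
                | some m => st.1 ++ [m]
                | none => st.1
      (children.getD mid []).foldl (fun s c => pvWalkThread by_id children f c s) (th, vis)

def reconstruct_threads (messages : List (List (String × String))) :
    List (List (List (String × String))) :=
  match messages with
  | [] => []
  | _ :: _ =>
    let bc := pvBuild messages
    let roots := messages.foldl
      (fun acc msg =>
        if (pvParent msg == "" || !(bc.1.contains (pvParent msg))) = true then acc ++ [pvMid msg] else acc) []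
    let tv := roots.foldl
      (fun st root =>
        let w := pvWalkThread bc.1 bc.2 (messages.length + 1) root ([], st.2)
        if w.1 = [] then (st.1, w.2) else (st.1 ++ [PySem.List.sorted w.1 pvDate false], w.2))
      ([], PySem.Set.empty)
    pvOrphans tv.1 tv.2 messages

-- ===== PORT B =====
-- by_id = {m["message_id"]: m for m in messages}
def pvBById (messages : List (List (String × String))) :
    PySem.Dict String (List (String × String)) :=
  messages.foldl (fun d m => d.insert (pvMid m) m) PySem.Dict.empty

-- the children.setdefault(...).append(...) loop, on its own
def pvBChildren (messages : List (List (String × String))) : PySem.Dict String (List String) :=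
  messages.foldl
    (fun d m => if pvParent m != "" then d.modify (pvParent m) [] (fun l => l ++ [pvMid m]) else d)
    PySem.Dict.empty

-- The inlined while-stack walk collecting message_ids only; the stack is modelled head-as-top,
-- so Python's pop() + extend(reversed(children)) is exactly 'children ++ rest'.  Fuel guard as in A.
def pvBWalk (children : PySem.Dict String (List String)) (fuel : Nat) (stack : List String)
    (order : List String) (vis : PySem.Set String) : List String × PySem.Set String :=
  match fuel, stack with
  | _, [] => (order, vis)
  | 0, _ :: _ => (order, vis)
  | f + 1, mid :: rest =>
    if vis.contains mid then pvBWalk children f rest order vis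
    else pvBWalk children f (children.getD mid [] ++ rest) (order ++ [mid]) (vis.add mid)

-- One iteration of the fused main loop: skip non-roots, else walk and emit the sorted thread.
-- by_id[k] is ported as getD: every collected id is a by_id key, so the KeyError arm is unreachable.
def pvBStep (by_id : PySem.Dict String (List (String × String)))
    (children : PySem.Dict String (List String)) (fuel : Nat)
    (st : List (List (List (String × String))) × PySem.Set String) (m : List (String × String)) :
    List (List (List (String × String))) × PySem.Set String :=
  if pvParent m != "" && by_id.contains (pvParent m) then st
  else
    let w := pvBWalk children fuel [pvMid m] [] st.2
    match w.1 with
    | [] => (st.1, w.2)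
    | _ :: _ =>
      (st.1 ++ [PySem.List.sorted (w.1.map (fun k => by_id.getD k [])) pvDate false], w.2)

-- One iteration of the orphan loop (continue-style).
def pvBOrphan (st : List (List (List (String × String))) × PySem.Set String)
    (m : List (String × String)) :
    List (List (List (String × String))) × PySem.Set String :=
  if st.2.contains (pvMid m) then st else (st.1 ++ [[m]], st.2.add (pvMid m))

def reconstruct_threads_alt (messages : List (List (String × String))) :
    List (List (List (String × String))) :=
  let by_id := pvBById messages
  let children := pvBChildren messages
  let tv := messages.foldl
    (pvBStep by_id children (messages.length * (messages.length + 1) + 1))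
    ([], PySem.Set.empty)
  (messages.foldl pvBOrphan tv).1

-- ===== PRECONDITION & SPEC =====
-- Pre_ excludes exactly the inputs where Python A raises KeyError: a message without "message_id".
def Pre_reconstruct_threads (messages : List (List (String × String))) : Prop :=
  ∀ m ∈ messages, (pvMsgGet? m "message_id").isSome = true
instance (messages : List (List (String × String))) : Decidable (Pre_reconstruct_threads messages) := by
  unfold Pre_reconstruct_threads; infer_instance

def pvWitness_reconstruct_threads : (List (List (String × String))) :=
  [[("message_id", "a"), ("date", "1")], [("message_id", "b"), ("in_reply_to", "a")]]

def Spec_reconstruct_threads (messages : List (List (String × String)))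
    (out : List (List (List (String × String)))) : Prop := out = reconstruct_threads_alt messages
instance (messages : List (List (String × String))) (out : List (List (List (String × String)))) :
    Decidable (Spec_reconstruct_threads messages out) := by unfold Spec_reconstruct_threads; infer_instance

-- ===== CLAIM (what is proved, stated in full; the proofs are below) =====
def Claim_equal_reconstruct_threads : Prop := ∀ (messages : List (List (String × String))), Dom_reconstruct_threads messages → Pre_reconstruct_threads messages → Spec_reconstruct_threads messages (reconstruct_threads messages)

-- ===== LEMMAS AND PROOFS =====

-- Proof-only intermediate: a message-collecting explicit-stack walk, the bridge between
-- A's recursion (pvStack_eq) and B's id-collecting loop (pvBWalk_map).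
def pvWalkStack (by_id : PySem.Dict String (List (String × String)))
    (children : PySem.Dict String (List String)) (fuel : Nat) (stack : List String)
    (st : List (List (String × String)) × PySem.Set String) :
    List (List (String × String)) × PySem.Set String :=
  match fuel, stack with
  | _, [] => st
  | 0, _ :: _ => st
  | f + 1, mid :: rest =>
    if st.2.contains mid then pvWalkStack by_id children f rest st
    else
      let vis := st.2.add mid
      let th := match by_id.get? mid with
                | some m => st.1 ++ [m]
                | none => st.1
      pvWalkStack by_id children f (children.getD mid [] ++ rest) (th, vis)

-- Number of by_id keys not yet visited: the termination/adequacy measure of the walk.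
def pvUnvis (b : PySem.Dict String (List (String × String))) (vis : PySem.Set String) : Nat :=
  b.keys.countP (fun i => !(vis.contains i))

theorem pvContains_eq_decide (vis : PySem.Set String) (i : String) :
    vis.contains i = decide (i ∈ vis) := by
  by_cases h : i ∈ vis
  · rw [(PySem.Set.contains_iff _ _).mpr h]; simp [h]
  · rw [Bool.eq_false_iff.mpr (fun hc => h ((PySem.Set.contains_iff _ _).mp hc))]; simp [h]

theorem pvContains_add_eq (vis : PySem.Set String) (mid i : String) :
    (vis.add mid).contains i = (decide (i ∈ vis) || decide (i = mid)) := by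
  rw [pvContains_eq_decide]
  by_cases h : i ∈ vis.add mid
  · rcases (PySem.Set.mem_add vis mid i).mp h with h1 | h1 <;> simp [h, h1]
  · simp only [PySem.Set.mem_add] at h
    push Not at h
    simp [h.1, h.2, PySem.Set.mem_add]

theorem pvCntP_pos {α : Type} (l : List α) (p : α → Bool) (x : α) (hx : x ∈ l) (hp : p x = true) :
    1 ≤ l.countP p :=
  (List.countP_pos_iff).mpr ⟨x, hx, hp⟩

theorem pvCnt_dec {α : Type} [DecidableEq α] (vis : List α) (mid : α) (hvm : mid ∉ vis) :
    ∀ (l : List α), l.Nodup → mid ∈ l →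
    l.countP (fun i => !decide (i ∈ vis) && !decide (i = mid)) + 1
      = l.countP (fun i => !decide (i ∈ vis)) := by
  intro l
  induction l with
  | nil => intro _ h; cases h
  | cons a t ih =>
    intro hnd hm
    rw [List.countP_cons, List.countP_cons]
    rcases List.mem_cons.mp hm with rfl | hmt
    · have hnot : mid ∉ t := (List.nodup_cons.mp hnd).1
      have ht : t.countP (fun i => !decide (i ∈ vis) && !decide (i = mid))
          = t.countP (fun i => !decide (i ∈ vis)) := by
        apply List.countP_congr
        intro x hx
        have : x ≠ mid := fun h => hnot (h ▸ hx)
        simp [this]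
      simp [ht, hvm]
    · have hamid : a ≠ mid := by rintro rfl; exact (List.nodup_cons.mp hnd).1 hmt
      have ih' := ih (List.nodup_cons.mp hnd).2 hmt
      by_cases hav : a ∈ vis <;> simp [hav, hamid] <;> omega

theorem pvUnvis_le (b : PySem.Dict String (List (String × String))) (vis : PySem.Set String) :
    pvUnvis b vis ≤ b.keys.length :=
  List.countP_le_length

theorem pvUnvis_pos (b : PySem.Dict String (List (String × String))) (vis : PySem.Set String)
    (mid : String) (hm : mid ∈ b.keys) (hv : vis.contains mid = false) :
    1 ≤ pvUnvis b vis :=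
  pvCntP_pos _ _ mid hm (by show (!(vis.contains mid)) = true; rw [hv]; rfl)

theorem pvUnvis_add (b : PySem.Dict String (List (String × String))) (vis : PySem.Set String)
    (mid : String) (hU : b.keys.Nodup) (hm : mid ∈ b.keys) (hv : vis.contains mid = false) :
    pvUnvis b (vis.add mid) + 1 = pvUnvis b vis := by
  have hvm : mid ∉ vis := fun h => by
    rw [(PySem.Set.contains_iff _ _).mpr h] at hv; cases hv
  unfold pvUnvis
  have h1 : b.keys.countP (fun i => !((vis.add mid).contains i))
      = b.keys.countP (fun i => !decide (i ∈ vis) && !decide (i = mid)) := by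
    apply List.countP_congr
    intro x _
    rw [pvContains_add_eq]
    simp
  have h2 : b.keys.countP (fun i => !(vis.contains i))
      = b.keys.countP (fun i => !decide (i ∈ vis)) := by
    apply List.countP_congr
    intro x _
    rw [pvContains_eq_decide]
  rw [h1, h2]
  exact pvCnt_dec vis mid hvm b.keys hU hm

theorem pvUnvis_mono (b : PySem.Dict String (List (String × String))) (vis vis' : PySem.Set String)
    (h : ∀ x, vis.contains x = true → vis'.contains x = true) :
    pvUnvis b vis' ≤ pvUnvis b vis := by
  apply List.countP_mono_left
  intro x _ hx
  simp only [Bool.not_eq_true'] at hx ⊢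
  cases hcb : vis.contains x with
  | false => rfl
  | true => rw [h x hcb] at hx; cases hx

theorem pvFoldl_pres {α σ : Type} (P : σ → Prop) (g : σ → α → σ)
    (h : ∀ s a, P s → P (g s a)) : ∀ (l : List α) (s : σ), P s → P (l.foldl g s) := by
  intro l
  induction l with
  | nil => intro s hs; exact hs
  | cons a t ih => intro s hs; exact ih _ (h s a hs)

theorem pvWalk_mono (b : PySem.Dict String (List (String × String)))
    (c : PySem.Dict String (List String)) :
    ∀ (f : Nat) (mid : String) (st : List (List (String × String)) × PySem.Set String) (x : String),
      st.2.contains x = true → (pvWalkThread b c f mid st).2.contains x = true := by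
  intro f
  induction f with
  | zero => intro mid st x hx; simpa [pvWalkThread] using hx
  | succ f ih =>
    intro mid st x hx
    rw [pvWalkThread]
    by_cases h : st.2.contains mid = true
    · rw [if_pos h]; exact hx
    · rw [if_neg h]
      apply pvFoldl_pres (fun s => s.2.contains x = true) _ (fun s a hs => ih a s x hs)
      have : x ∈ st.2 := (PySem.Set.contains_iff _ _).mp hx
      exact (PySem.Set.contains_iff _ _).mpr ((PySem.Set.mem_add _ _ _).mpr (Or.inl this))

theorem pvWalk_irrel (b : PySem.Dict String (List (String × String)))
    (c : PySem.Dict String (List String)) (hU : b.keys.Nodup)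
    (hC : ∀ k x, x ∈ c.getD k ([] : List String) → x ∈ b.keys) :
    ∀ (n f f' : Nat) (mid : String) (st : List (List (String × String)) × PySem.Set String),
      mid ∈ b.keys → pvUnvis b st.2 ≤ n → n < f → n < f' →
      pvWalkThread b c f mid st = pvWalkThread b c f' mid st := by
  intro n
  induction n using Nat.strong_induction_on with
  | _ n ihn =>
    intro f f' mid st hm hun hf hf'
    obtain ⟨fa, rfl⟩ : ∃ k, f = k + 1 := ⟨f - 1, by omega⟩
    obtain ⟨fb, rfl⟩ : ∃ k, f' = k + 1 := ⟨f' - 1, by omega⟩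
    rw [pvWalkThread, pvWalkThread]
    by_cases h : st.2.contains mid = true
    · rw [if_pos h, if_pos h]
    · rw [if_neg h, if_neg h]
      have hpos : 1 ≤ pvUnvis b st.2 :=
        pvUnvis_pos b st.2 mid hm (Bool.not_eq_true _ ▸ (by simpa using h))
      have hdec : pvUnvis b (st.2.add mid) + 1 = pvUnvis b st.2 :=
        pvUnvis_add b st.2 mid hU hm (by simpa using h)
      have fold : ∀ (l : List String) (s : List (List (String × String)) × PySem.Set String),
          (∀ x ∈ l, x ∈ b.keys) → pvUnvis b s.2 ≤ n - 1 →
          l.foldl (fun s y => pvWalkThread b c fa y s) s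
            = l.foldl (fun s y => pvWalkThread b c fb y s) s := by
        intro l
        induction l with
        | nil => intro s _ _; rfl
        | cons a t iht =>
          intro s hl hs
          have hstep : pvWalkThread b c fa a s = pvWalkThread b c fb a s :=
            ihn (n - 1) (by omega) fa fb a s (hl a List.mem_cons_self) hs (by omega) (by omega)
          simp only [List.foldl_cons]
          rw [hstep]
          exact iht _ (fun x hx => hl x (List.mem_cons_of_mem a hx))
            (le_trans (pvUnvis_mono b s.2 _ (fun x hx => pvWalk_mono b c fb a s x hx)) hs)
      refine fold _ _ (fun x hx => hC mid x hx) ?_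
      show pvUnvis b (st.2.add mid) ≤ n - 1
      omega

theorem pvFold_irrel (b : PySem.Dict String (List (String × String)))
    (c : PySem.Dict String (List String)) (hU : b.keys.Nodup)
    (hC : ∀ k x, x ∈ c.getD k ([] : List String) → x ∈ b.keys) :
    ∀ (n f f' : Nat) (l : List String) (st : List (List (String × String)) × PySem.Set String),
      (∀ x ∈ l, x ∈ b.keys) → pvUnvis b st.2 ≤ n → n < f → n < f' →
      l.foldl (fun s y => pvWalkThread b c f y s) st
        = l.foldl (fun s y => pvWalkThread b c f' y s) st := by
  intro n f f' l
  induction l with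
  | nil => intro st _ _ _ _; rfl
  | cons a t iht =>
    intro st hl hs hf hf'
    have hstep : pvWalkThread b c f a st = pvWalkThread b c f' a st :=
      pvWalk_irrel b c hU hC n f f' a st (hl a List.mem_cons_self) hs hf hf'
    simp only [List.foldl_cons]
    rw [hstep]
    exact iht _ (fun x hx => hl x (List.mem_cons_of_mem a hx))
      (le_trans (pvUnvis_mono b st.2 _ (fun x hx => pvWalk_mono b c f' a st x hx)) hs) hf hf'

theorem pvStack_eq (b : PySem.Dict String (List (String × String)))
    (c : PySem.Dict String (List String)) (hU : b.keys.Nodup)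
    (hC : ∀ k x, x ∈ c.getD k ([] : List String) → x ∈ b.keys)
    (C : Nat) (hL : ∀ k, (c.getD k ([] : List String)).length ≤ C)
    (fA : Nat) (hF : b.keys.length < fA) :
    ∀ (fB : Nat) (stack : List String) (st : List (List (String × String)) × PySem.Set String),
      (∀ x ∈ stack, x ∈ b.keys) → pvUnvis b st.2 * (C + 1) + stack.length ≤ fB →
      pvWalkStack b c fB stack st = stack.foldl (fun s mid => pvWalkThread b c fA mid s) st := by
  intro fB
  induction fB with
  | zero =>
    intro stack st hmem hb
    cases stack with
    | nil => rfl
    | cons a r => simp only [List.length_cons] at hb; omega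
  | succ g ih =>
    intro stack st hmem hb
    cases stack with
    | nil => rfl
    | cons mid rest =>
      obtain ⟨k, rfl⟩ : ∃ k, fA = k + 1 := ⟨fA - 1, by omega⟩
      rw [pvWalkStack]
      by_cases h : st.2.contains mid = true
      · rw [if_pos h]
        have hrhs : pvWalkThread b c (k + 1) mid st = st := by rw [pvWalkThread, if_pos h]
        simp only [List.foldl_cons, hrhs]
        refine ih rest st (fun x hx => hmem x (List.mem_cons_of_mem mid hx)) ?_
        simp only [List.length_cons] at hb
        omega
      · rw [if_neg h]
        have hmid : mid ∈ b.keys := hmem mid List.mem_cons_self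
        have hvf : st.2.contains mid = false := by simpa using h
        have hdec := pvUnvis_add b st.2 mid hU hmid hvf
        have hcs : ∀ x ∈ c.getD mid ([] : List String), x ∈ b.keys := fun x hx => hC mid x hx
        have hlen : (c.getD mid ([] : List String)).length ≤ C := hL mid
        have hkk : b.keys.length ≤ k := by omega
        show pvWalkStack b c g (c.getD mid [] ++ rest)
            ((match b.get? mid with
              | some m => st.1 ++ [m]
              | none => st.1), st.2.add mid)
          = List.foldl (fun s mid => pvWalkThread b c (k + 1) mid s) st (mid :: rest)
        have hmem' : ∀ x ∈ c.getD mid ([] : List String) ++ rest, x ∈ b.keys := by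
          intro x hx
          rcases List.mem_append.mp hx with hx | hx
          · exact hcs x hx
          · exact hmem x (List.mem_cons_of_mem mid hx)
        have harg : pvUnvis b (st.2.add mid) * (C + 1)
            + (c.getD mid ([] : List String) ++ rest).length ≤ g := by
          have hlc : (c.getD mid ([] : List String) ++ rest).length
              = (c.getD mid ([] : List String)).length + rest.length := by simp
          have hbc : (mid :: rest).length = rest.length + 1 := by simp
          have hmul : pvUnvis b st.2 * (C + 1)
              = pvUnvis b (st.2.add mid) * (C + 1) + (C + 1) := by rw [← hdec]; ring
          rw [hlc]
          rw [hbc, hmul] at hb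
          generalize pvUnvis b (st.2.add mid) * (C + 1) = A at hb ⊢
          omega
        rw [ih _ _ hmem' harg, List.foldl_append]
        conv_rhs => rw [List.foldl_cons, pvWalkThread, if_neg h]
        congr 1
        have hk1 : 1 ≤ b.keys.length := List.length_pos_of_mem hmid
        refine pvFold_irrel b c hU hC (b.keys.length - 1) (k + 1) k _ _ hcs ?_ (by omega) (by omega)
        show pvUnvis b (st.2.add mid) ≤ b.keys.length - 1
        have := pvUnvis_le b st.2
        omega

-- B's id-collecting walk, mapped through by_id lookup, IS the message-collecting walk.
theorem pvBWalk_map (b : PySem.Dict String (List (String × String)))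
    (c : PySem.Dict String (List String))
    (hC : ∀ k x, x ∈ c.getD k ([] : List String) → x ∈ b.keys) :
    ∀ (f : Nat) (stack order : List String) (vis : PySem.Set String),
      (∀ x ∈ stack, x ∈ b.keys) →
      pvWalkStack b c f stack (order.map (fun k => b.getD k []), vis)
        = ((pvBWalk c f stack order vis).1.map (fun k => b.getD k []),
           (pvBWalk c f stack order vis).2) := by
  intro f
  induction f with
  | zero =>
    intro stack order vis _
    cases stack with
    | nil => rfl
    | cons a r => rfl
  | succ g ih =>
    intro stack order vis hmem
    cases stack with
    | nil => rfl
    | cons mid rest =>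
      rw [pvWalkStack, pvBWalk]
      by_cases h : vis.contains mid = true
      · rw [if_pos h, if_pos h]
        exact ih rest order vis (fun x hx => hmem x (List.mem_cons_of_mem mid hx))
      · rw [if_neg h, if_neg h]
        have hmid : mid ∈ b.keys := hmem mid List.mem_cons_self
        have hsome : b.get? mid = some (b.getD mid []) := by
          have hcb : b.contains mid = true := (PySem.Dict.contains_iff_mem_keys b mid).mpr hmid
          rw [PySem.Dict.contains_eq_isSome_get?] at hcb
          rcases Option.isSome_iff_exists.mp hcb with ⟨v, hv⟩
          rw [PySem.Dict.getD_eq_get?_getD, hv]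
          rfl
        have hmem' : ∀ x ∈ c.getD mid ([] : List String) ++ rest, x ∈ b.keys := by
          intro x hx
          rcases List.mem_append.mp hx with hx | hx
          · exact hC mid x hx
          · exact hmem x (List.mem_cons_of_mem mid hx)
        have := ih (c.getD mid [] ++ rest) (order ++ [mid]) (vis.add mid) hmem'
        rw [List.map_append] at this
        simpa [hsome] using this

-- The two halves of A's build loop, as standalone folds.
def pvF1 (d : PySem.Dict String (List (String × String))) (m : List (String × String)) :
    PySem.Dict String (List (String × String)) := d.insert (pvMid m) m

def pvF2 (d : PySem.Dict String (List String)) (m : List (String × String)) :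
    PySem.Dict String (List String) :=
  if pvParent m ≠ "" then d.modify (pvParent m) [] (fun l => l ++ [pvMid m]) else d

theorem pvBuild_eq : ∀ (l : List (List (String × String)))
    (s : PySem.Dict String (List (String × String)) × PySem.Dict String (List String)),
    l.foldl (fun st msg =>
      (st.1.insert (pvMid msg) msg,
       if pvParent msg ≠ "" then st.2.modify (pvParent msg) [] (fun l => l ++ [pvMid msg]) else st.2)) s
      = (l.foldl pvF1 s.1, l.foldl pvF2 s.2) := by
  intro l
  induction l with
  | nil => intro s; rfl
  | cons m t ih => intro s; exact ih (pvF1 s.1 m, pvF2 s.2 m)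

-- B's two separate build folds compute exactly the two components of A's paired fold.
theorem pvBById_eq (ms : List (List (String × String))) : pvBById ms = (pvBuild ms).1 := by
  unfold pvBuild pvBById
  rw [pvBuild_eq]
  rfl

theorem pvBChildren_eq (ms : List (List (String × String))) : pvBChildren ms = (pvBuild ms).2 := by
  unfold pvBuild pvBChildren
  rw [pvBuild_eq]
  show List.foldl _ _ ms = List.foldl pvF2 _ ms
  congr 1
  funext d m
  unfold pvF2
  by_cases h : pvParent m = "" <;> simp [h]

-- A's per-root loop body.
def pvStepA (b : PySem.Dict String (List (String × String)))
    (c : PySem.Dict String (List String)) (F : Nat)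
    (st : List (List (List (String × String))) × PySem.Set String) (root : String) :
    List (List (List (String × String))) × PySem.Set String :=
  let w := pvWalkThread b c F root ([], st.2)
  if w.1 = [] then (st.1, w.2) else (st.1 ++ [PySem.List.sorted w.1 pvDate false], w.2)

def pvCond (b : PySem.Dict String (List (String × String))) (msg : List (String × String)) : Bool :=
  pvParent msg == "" || !(b.contains (pvParent msg))

theorem pvBStep_skip (b : PySem.Dict String (List (String × String)))
    (c : PySem.Dict String (List String)) (F : Nat)
    (st : List (List (List (String × String))) × PySem.Set String) (m : List (String × String))
    (h : pvCond b m = false) : pvBStep b c F st m = st := by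
  unfold pvCond at h
  unfold pvBStep
  rw [if_pos]
  simp only [Bool.or_eq_false_iff, Bool.not_eq_false'] at h
  simp [bne, h.1, h.2]

theorem pvBStep_root (b : PySem.Dict String (List (String × String)))
    (c : PySem.Dict String (List String)) (hU : b.keys.Nodup)
    (hC : ∀ k x, x ∈ c.getD k ([] : List String) → x ∈ b.keys)
    (C : Nat) (hL : ∀ k, (c.getD k ([] : List String)).length ≤ C)
    (fA fB : Nat) (hF : b.keys.length < fA) (hFB : b.keys.length * (C + 1) + 1 ≤ fB)
    (st : List (List (List (String × String))) × PySem.Set String) (m : List (String × String))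
    (hm : pvMid m ∈ b.keys) (h : pvCond b m = true) :
    pvBStep b c fB st m = pvStepA b c fA st (pvMid m) := by
  unfold pvCond at h
  have hneg : ¬ ((pvParent m != "" && b.contains (pvParent m)) = true) := by
    simp only [Bool.or_eq_true, beq_iff_eq, Bool.not_eq_true'] at h
    rcases h with h | h <;> simp [bne, h]
  unfold pvBStep
  rw [if_neg hneg]
  have hids := pvBWalk_map b c hC fB [pvMid m] [] st.2
    (by intro x hx; rw [List.mem_singleton] at hx; rw [hx]; exact hm)
  have hstk := pvStack_eq b c hU hC C hL fA hF fB [pvMid m] ([], st.2)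
    (by intro x hx; rw [List.mem_singleton] at hx; rw [hx]; exact hm)
    (by
      have h1 : pvUnvis b st.2 ≤ b.keys.length := pvUnvis_le _ _
      have := Nat.mul_le_mul_right (C + 1) h1
      simp only [List.length_cons, List.length_nil]
      omega)
  simp only [List.map_nil] at hids
  simp only [List.foldl_cons, List.foldl_nil] at hstk
  have hWA : pvWalkThread b c fA (pvMid m) ([], st.2)
      = ((pvBWalk c fB [pvMid m] [] st.2).1.map (fun k => b.getD k []),
         (pvBWalk c fB [pvMid m] [] st.2).2) := hstk.symm.trans hids
  simp only [pvStepA]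
  rw [hWA]
  cases (pvBWalk c fB [pvMid m] [] st.2).1 with
  | nil => simp
  | cons x xs => simp

-- The fused loop equals root-collection followed by the per-root fold.
theorem pvFused_eq (b : PySem.Dict String (List (String × String)))
    (c : PySem.Dict String (List String)) (fA fB : Nat)
    (hU : b.keys.Nodup)
    (hC : ∀ k x, x ∈ c.getD k ([] : List String) → x ∈ b.keys)
    (C : Nat) (hL : ∀ k, (c.getD k ([] : List String)).length ≤ C)
    (hF : b.keys.length < fA) (hFB : b.keys.length * (C + 1) + 1 ≤ fB) :
    ∀ (l : List (List (String × String))), (∀ m ∈ l, pvMid m ∈ b.keys) →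
      ∀ (st : List (List (List (String × String))) × PySem.Set String),
      l.foldl (pvBStep b c fB) st
        = ((l.filter (pvCond b)).map pvMid).foldl (pvStepA b c fA) st := by
  intro l
  induction l with
  | nil => intro _ st; rfl
  | cons m t ih =>
    intro hk st
    simp only [List.foldl_cons, List.filter_cons]
    cases hcm : pvCond b m with
    | false =>
      rw [pvBStep_skip b c fB st m hcm]
      exact ih (fun x hx => hk x (List.mem_cons_of_mem m hx)) st
    | true =>
      rw [pvBStep_root b c hU hC C hL fA fB hF hFB st m (hk m List.mem_cons_self) hcm]
      exact ih (fun x hx => hk x (List.mem_cons_of_mem m hx)) _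

-- B's continue-style orphan fold is A's orphan loop.
theorem pvBOrphan_eq (ms : List (List (String × String)))
    (tv : List (List (List (String × String))) × PySem.Set String) :
    (ms.foldl pvBOrphan tv).1 = pvOrphans tv.1 tv.2 ms := by
  unfold pvOrphans
  have : pvBOrphan = (fun (st : List (List (List (String × String))) × PySem.Set String) msg =>
      if st.2.contains (pvMid msg) = false then (st.1 ++ [[msg]], st.2.add (pvMid msg)) else st) := by
    funext st m
    unfold pvBOrphan
    cases st.2.contains (pvMid m) <;> simp
  rw [this]

theorem pvReconA_cons (a : List (String × String)) (t : List (List (String × String))) :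
    reconstruct_threads (a :: t)
      = pvOrphans
          (((a :: t).foldl (fun acc msg => if pvCond (pvBuild (a :: t)).1 msg = true
              then acc ++ [pvMid msg] else acc) []).foldl
            (pvStepA (pvBuild (a :: t)).1 (pvBuild (a :: t)).2 ((a :: t).length + 1))
            ([], PySem.Set.empty)).1
          (((a :: t).foldl (fun acc msg => if pvCond (pvBuild (a :: t)).1 msg = true
              then acc ++ [pvMid msg] else acc) []).foldl
            (pvStepA (pvBuild (a :: t)).1 (pvBuild (a :: t)).2 ((a :: t).length + 1))
            ([], PySem.Set.empty)).2
          (a :: t) := rfl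

theorem pvChild_sub (P : String → Prop) :
    ∀ (l : List (List (String × String))) (d : PySem.Dict String (List String)),
      (∀ k x, x ∈ d.getD k ([] : List String) → P x) → (∀ m ∈ l, P (pvMid m)) →
      ∀ k x, x ∈ (l.foldl pvF2 d).getD k ([] : List String) → P x := by
  intro l
  induction l with
  | nil => exact fun d hd _ => hd
  | cons m t ih =>
    intro d hd hl
    simp only [List.foldl_cons]
    apply ih
    · intro k x hx
      unfold pvF2 at hx
      by_cases hp : pvParent m ≠ ""
      · rw [if_pos hp, PySem.Dict.getD_modify] at hx
        by_cases hk : k = pvParent m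
        · rw [if_pos hk] at hx
          rcases List.mem_append.mp hx with h1 | h1
          · exact hd _ x h1
          · rw [List.mem_singleton] at h1; subst h1; exact hl m List.mem_cons_self
        · rw [if_neg hk] at hx; exact hd _ x hx
      · rw [if_neg hp] at hx; exact hd _ x hx
    · exact fun m' hm' => hl m' (List.mem_cons_of_mem m hm')

theorem pvChild_len :
    ∀ (l : List (List (String × String))) (d : PySem.Dict String (List String)) (n : Nat),
      (∀ k, (d.getD k ([] : List String)).length ≤ n) →
      ∀ k, ((l.foldl pvF2 d).getD k ([] : List String)).length ≤ n + l.length := by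
  intro l
  induction l with
  | nil => intro d n hd k; simpa using hd k
  | cons m t ih =>
    intro d n hd k
    simp only [List.foldl_cons, List.length_cons]
    have hstep : ∀ k', ((pvF2 d m).getD k' ([] : List String)).length ≤ n + 1 := by
      intro k'
      unfold pvF2
      by_cases hp : pvParent m ≠ ""
      · rw [if_pos hp, PySem.Dict.getD_modify]
        by_cases hk : k' = pvParent m
        · rw [if_pos hk, List.length_append]
          have := hd (pvParent m); simp; omega
        · rw [if_neg hk]; exact le_trans (hd k') (by omega)
      · rw [if_neg hp]; exact le_trans (hd k') (by omega)
    have := ih (pvF2 d m) (n + 1) hstep k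
    omega

-- ===== VERDICT (by name: the statement is the Claim_ definition above) =====
theorem reconstruct_threads_spec : Claim_equal_reconstruct_threads := by
  intro ms _hdom _hpre
  unfold Spec_reconstruct_threads
  cases ms with
  | nil => rfl
  | cons a t =>
    have hb12 : pvBuild (a :: t)
        = ((a :: t).foldl pvF1 PySem.Dict.empty, (a :: t).foldl pvF2 PySem.Dict.empty) := by
      unfold pvBuild
      exact pvBuild_eq (a :: t) (PySem.Dict.empty, PySem.Dict.empty)
    have hkeys : (pvBuild (a :: t)).1.keys = PySem.Set.ofList ((a :: t).map pvMid) := by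
      rw [hb12]
      have := PySem.Dict.keys_foldl_insert_key (ν := List (String × String)) (a :: t) pvMid
        (fun _ x => x) PySem.Dict.empty
      simpa [pvF1, PySem.Dict.keys_empty, PySem.Set.update_empty] using this
    have hU : (pvBuild (a :: t)).1.keys.Nodup := by
      rw [hkeys]; exact PySem.Set.nodup_ofList _
    have hlen : (pvBuild (a :: t)).1.keys.length ≤ (a :: t).length := by
      rw [hkeys]
      exact le_trans (PySem.Set.length_ofList_le _) (by rw [List.length_map])
    have hmidkeys : ∀ m ∈ (a :: t), pvMid m ∈ (pvBuild (a :: t)).1.keys := by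
      intro m hm
      rw [hkeys]
      exact (PySem.Set.mem_ofList _ _).mpr (List.mem_map.mpr ⟨m, hm, rfl⟩)
    have hC : ∀ k x, x ∈ (pvBuild (a :: t)).2.getD k ([] : List String)
        → x ∈ (pvBuild (a :: t)).1.keys := by
      have h2 : (pvBuild (a :: t)).2 = (a :: t).foldl pvF2 PySem.Dict.empty := by rw [hb12]
      rw [h2]
      exact pvChild_sub _ (a :: t) PySem.Dict.empty
        (by intro k x hx; rw [PySem.Dict.getD_empty] at hx; cases hx) hmidkeys
    have hL : ∀ k, ((pvBuild (a :: t)).2.getD k ([] : List String)).length ≤ (a :: t).length := by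
      have h2 : (pvBuild (a :: t)).2 = (a :: t).foldl pvF2 PySem.Dict.empty := by rw [hb12]
      rw [h2]
      intro k
      have := pvChild_len (a :: t) PySem.Dict.empty 0
        (by intro k'; rw [PySem.Dict.getD_empty]; simp) k
      omega
    have hroots : (a :: t).foldl (fun acc msg => if pvCond (pvBuild (a :: t)).1 msg = true
          then acc ++ [pvMid msg] else acc) []
        = ((a :: t).filter (pvCond (pvBuild (a :: t)).1)).map pvMid := by
      rw [PySem.List.foldl_append_if, List.nil_append]
    rw [pvReconA_cons, hroots]
    show pvOrphans _ _ _ = reconstruct_threads_alt (a :: t)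
    unfold reconstruct_threads_alt
    rw [pvBById_eq, pvBChildren_eq, pvBOrphan_eq]
    rw [pvFused_eq (pvBuild (a :: t)).1 (pvBuild (a :: t)).2 ((a :: t).length + 1)
      ((a :: t).length * ((a :: t).length + 1) + 1)
      hU hC (a :: t).length hL (by omega)
      (by
        have := Nat.mul_le_mul_right ((a :: t).length + 1) hlen
        omega)
      (a :: t) hmidkeys]
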